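-- pv_equiv track=rewrite | github.com/houxizhu/python | codeforces/1007.div2/d1.py | codeforces
-- ===== SOURCE A (Python) =====
-- def codeforces(n: int, l: int, r: int, arr: list):
--     if r <= n:
--         return arr[r - 1]  # Since Python uses 0-based indexing
--
--     # Compute prefix XOR for given values
--     prefix_xor = [0] * (n + 1)
--     for i in range(1, n + 1):
--         prefix_xor[i] = prefix_xor[i - 1] ^ arr[i - 1]
--
--     # Compute a[r] using the recurrence relation
--     computed_values = arr[:]
--     while len(computed_values) <= r:
--         m = len(computed_values)
--         new_value = prefix_xor[m // 2]  # XOR of first m//2 elements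
--         computed_values.append(new_value)
--         prefix_xor.append(prefix_xor[-1] ^ new_value)
--
--     return computed_values[r - 1]
-- ===== SOURCE B (Python) =====
-- def codeforces(n: int, l: int, r: int, arr: list):
--     if r <= len(arr):
--         return arr[r - 1]
--     L = len(arr)
--     # prefix-xor table of the given values
--     pre = [0]
--     for x in arr:
--         pre.append(pre[-1] ^ x)
--     # For i > L the sequence satisfies a[i] = P[(i-1)//2], where P[k] is the xor of its
--     # first k terms, so P[k] = P[k-1] ^ P[(k-1)//2] for k > L.  Unrolling P[k] as an
--     # xor-sum, consecutive terms cancel pairwise and only boundary terms survive,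
--     # giving a halving recursion instead of a term-by-term simulation.
--     def xor_prefix(k):
--         if k <= L:
--             return pre[k]
--         v = pre[L]
--         if L % 2 == 1:
--             v ^= pre[L // 2]
--         if (k - 1) % 2 == 0:
--             v ^= xor_prefix((k - 1) // 2)
--         return v
--     return xor_prefix((r - 1) // 2)
-- ===== Notes on version B (the rewrite author's own statement) =====
-- stated objective: alternative
-- what changed: A simulates the sequence forward term by term up to index r; B computes the r-th term directly from the prefix-xor table via a halving recursion that exploits pairwise cancellation in the xor-prefix recurrence (O(log r) recursion instead of r - n loop iterations); …
-- outside the precondition, e.g. on codeforces(1, 0, 6, [3, 5]): A returns 0, B returns 6; on codeforces(3, 0, 5, [7]): A raises IndexError, B returns 7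
import Mathlib
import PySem

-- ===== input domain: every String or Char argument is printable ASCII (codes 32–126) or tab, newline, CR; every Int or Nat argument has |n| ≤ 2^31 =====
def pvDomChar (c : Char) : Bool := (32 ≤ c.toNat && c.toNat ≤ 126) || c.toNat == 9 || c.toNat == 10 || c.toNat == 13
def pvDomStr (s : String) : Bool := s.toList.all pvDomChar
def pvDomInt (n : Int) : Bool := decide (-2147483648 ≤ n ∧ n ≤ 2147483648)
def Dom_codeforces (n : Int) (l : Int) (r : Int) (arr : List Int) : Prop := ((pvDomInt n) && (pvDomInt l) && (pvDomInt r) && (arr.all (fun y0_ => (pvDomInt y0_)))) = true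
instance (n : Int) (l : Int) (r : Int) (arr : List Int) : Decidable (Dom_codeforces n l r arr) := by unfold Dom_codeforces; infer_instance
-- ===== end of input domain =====

-- B replaces A's forward simulation of the xor-prefix sequence up to index r by a halving
-- recursion exploiting pairwise cancellation of the xor terms; equal return values are proved
-- below on Pre_ (stored elements for any n; computed terms on the natural domain len(arr) = n).

-- ===== PORT A =====
-- the 'for i in range(1, n+1)' loop filling prefix_xor in place
def pvBuildPreA (n : Int) (arr : List Int) : List Int :=
  (PySem.List.pyRange 1 (n + 1) 1).foldl
    (fun pre i =>
      PySem.List.pySetD pre i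
        (PySem.Int.bxor ((PySem.List.pyGet? pre (i - 1)).getD 0)
          ((PySem.List.pyGet? arr (i - 1)).getD 0)))
    (List.replicate (n + 1).toNat 0)

-- the 'while len(computed_values) <= r' loop; state = (computed_values, prefix_xor)
def pvLoopA (r : Int) (cv : List Int) (pre : List Int) : List Int :=
  if (cv.length : Int) ≤ r then
    let nv := (PySem.List.pyGet? pre (PySem.Int.floordiv (cv.length : Int) 2)).getD 0
    pvLoopA r (cv ++ [nv]) (pre ++ [PySem.Int.bxor ((PySem.List.pyGet? pre (-1)).getD 0) nv])
  else cv
termination_by (r + 1 - cv.length).toNat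
decreasing_by simp only [List.length_append, List.length_cons, List.length_nil]; omega

def codeforces (n : Int) (l : Int) (r : Int) (arr : List Int) : Int :=
  if r ≤ n then (PySem.List.pyGet? arr (r - 1)).getD 0
  else (PySem.List.pyGet? (pvLoopA r arr (pvBuildPreA n arr)) (r - 1)).getD 0

-- ===== PORT B =====
-- 'pre = [0]; for x in arr: pre.append(pre[-1] ^ x)'
def pvPreB (xs : List Int) : List Int :=
  xs.foldl (fun pre x => pre ++ [PySem.Int.bxor ((PySem.List.pyGet? pre (-1)).getD 0) x]) [0]

-- Source B's inner 'def xor_prefix(k)'.  L = len(arr) and every value k it is called with are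
-- natural numbers in Source B (it is reached only for r > len(arr) ≥ 0), so L and k are Nat here
-- and Python's //, % on them are Nat division and mod, exact on this domain.
def pvP (L : Nat) (pre : List Int) (k : Nat) : Int :=
  if k ≤ L then (PySem.List.pyGet? pre (k : Int)).getD 0
  else
    let v0 := (PySem.List.pyGet? pre (L : Int)).getD 0
    let v1 := if L % 2 = 1 then
        PySem.Int.bxor v0 ((PySem.List.pyGet? pre ((L / 2 : Nat) : Int)).getD 0)
      else v0
    if (k - 1) % 2 = 0 then PySem.Int.bxor v1 (pvP L pre ((k - 1) / 2)) else v1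
termination_by k
decreasing_by omega

def codeforces_alt (n : Int) (l : Int) (r : Int) (arr : List Int) : Int :=
  if r ≤ (arr.length : Int) then (PySem.List.pyGet? arr (r - 1)).getD 0
  else pvP arr.length (pvPreB arr) (PySem.Int.floordiv (r - 1) 2).toNat

-- ===== PRECONDITION & SPEC =====
-- Pre_ keeps every input where A returns a stored element of arr (first two disjuncts) and,
-- for computed terms, the natural domain len(arr) = n (n is arr's declared length); it
-- excludes inputs with len(arr) ≠ n ≤ r, where A's computed values are an accident of its
-- two buffers growing from different lengths, and inputs where A raises IndexError
-- (r < 1 - len(arr), or len(arr) < n ≤ r).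
def Pre_codeforces (n : Int) (l : Int) (r : Int) (arr : List Int) : Prop :=
  1 - (arr.length : Int) ≤ r ∧
    ((r ≤ n ∧ r ≤ (arr.length : Int)) ∨ (n < r ∧ r < (arr.length : Int)) ∨
      (n = (arr.length : Int) ∧ (arr.length : Int) ≤ r))
instance (n : Int) (l : Int) (r : Int) (arr : List Int) : Decidable (Pre_codeforces n l r arr) := by unfold Pre_codeforces; infer_instance

def pvWitness_codeforces : Int × Int × Int × List Int := (2, 0, 5, [1, 2])

def Spec_codeforces (n : Int) (l : Int) (r : Int) (arr : List Int) (out : Int) : Prop := out = codeforces_alt n l r arr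
instance (n : Int) (l : Int) (r : Int) (arr : List Int) (out : Int) : Decidable (Spec_codeforces n l r arr out) := by unfold Spec_codeforces; infer_instance

-- ===== CLAIM (what is proved, stated in full; the proofs are below) =====
def Claim_equal_codeforces : Prop := ∀ (n : Int) (l : Int) (r : Int) (arr : List Int), Dom_codeforces n l r arr → Pre_codeforces n l r arr → Spec_codeforces n l r arr (codeforces n l r arr)

-- ===== LEMMAS AND PROOFS =====

theorem pvBxorAssoc (a b c : Int) : PySem.Int.bxor (PySem.Int.bxor a b) c = PySem.Int.bxor a (PySem.Int.bxor b c) := by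
  have hh : ∀ x : Int, -(-x - 1) - 1 = x := by intro x; ring
  unfold PySem.Int.bxor
  split_ifs <;> first
    | omega
    | simp only [hh, Int.toNat_natCast, Nat.xor_assoc]

-- the mathematical prefix-xor table: pvQ arr nn k = value A's table carries at index k
-- (nn = the 'n' argument; beyond nn the table grows by Q k = Q (k-1) ^ Q ((k-1+L-nn)/2)).
def pvXor (arr : List Int) (k : Nat) : Int := (arr.take k).foldl PySem.Int.bxor 0

def pvQ (arr : List Int) (nn : Nat) : Nat → Int
  | k =>
    if k ≤ nn then pvXor arr k
    else PySem.Int.bxor (pvQ arr nn (k - 1))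
      (pvQ arr nn (min ((k - 1 + arr.length - nn) / 2) (k - 1)))
termination_by k => k
decreasing_by all_goals omega

-- the i-th term (1-based) of the full produced sequence
def pvA (arr : List Int) (nn i : Nat) : Int :=
  if i ≤ arr.length then arr.getD (i - 1) 0 else pvQ arr nn ((i - 1) / 2)

def pvAvals (arr : List Int) (nn m : Nat) : List Int := (List.range m).map (fun j => pvA arr nn (j + 1))
def pvQvals (arr : List Int) (nn q : Nat) : List Int := (List.range (q + 1)).map (pvQ arr nn)

theorem pvQ_high (arr : List Int) (nn k : Nat) (h2 : arr.length ≤ 2 * nn + 1) (hk : nn < k) :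
    pvQ arr nn k = PySem.Int.bxor (pvQ arr nn (k - 1)) (pvQ arr nn ((k - 1 + arr.length - nn) / 2)) := by
  rw [pvQ, if_neg (by omega), min_eq_left (by omega)]

theorem pvQ_step (arr : List Int) (nn j : Nat) (hj : j < nn) (hnL : nn ≤ arr.length) :
    pvQ arr nn (j + 1) = PySem.Int.bxor (pvQ arr nn j) (arr.getD j 0) := by
  rw [pvQ, if_pos (by omega), pvQ, if_pos (by omega)]
  have hjL : j < arr.length := by omega
  simp only [pvXor, List.take_succ, List.getElem?_eq_getElem hjL, Option.toList_some,
    List.foldl_append, List.foldl_cons, List.foldl_nil]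
  simp [List.getD_eq_getElem?_getD, List.getElem?_eq_getElem hjL]

theorem pvA_high (arr : List Int) (nn m : Nat) (h : arr.length ≤ m) :
    pvA arr nn (m + 1) = pvQ arr nn (m / 2) := by
  rw [pvA, if_neg (by omega)]
  simp only [Nat.add_sub_cancel]

theorem pvQvals_length (arr : List Int) (nn q : Nat) : (pvQvals arr nn q).length = q + 1 := by
  simp [pvQvals]

theorem pvAvals_length (arr : List Int) (nn m : Nat) : (pvAvals arr nn m).length = m := by
  simp [pvAvals]

theorem pvQvals_snoc (arr : List Int) (nn q : Nat) :
    pvQvals arr nn (q + 1) = pvQvals arr nn q ++ [pvQ arr nn (q + 1)] := by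
  simp [pvQvals, List.range_succ]

theorem pvAvals_snoc (arr : List Int) (nn m : Nat) :
    pvAvals arr nn (m + 1) = pvAvals arr nn m ++ [pvA arr nn (m + 1)] := by
  simp [pvAvals, List.range_succ]

theorem pvQvals_get (arr : List Int) (nn q k : Nat) (h : k ≤ q) :
    (PySem.List.pyGet? (pvQvals arr nn q) (k : Int)).getD 0 = pvQ arr nn k := by
  simp [pvQvals, PySem.List.pyGet?_natCast, Nat.lt_succ_of_le h]

theorem pvQvals_last (arr : List Int) (nn q : Nat) :
    (PySem.List.pyGet? (pvQvals arr nn q) (-1)).getD 0 = pvQ arr nn q := by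
  cases q with
  | zero => simp [pvQvals, PySem.List.pyGet?_neg_one]
  | succ q => rw [pvQvals_snoc]; simp [PySem.List.pyGet?_neg_one_append_singleton]

theorem pvAvals_get (arr : List Int) (nn m j : Nat) (h : j < m) :
    (pvAvals arr nn m)[j]? = some (pvA arr nn (j + 1)) := by
  simp [pvAvals, List.getElem?_eq_getElem, h]

theorem pvAvals_eq (arr : List Int) (nn : Nat) : pvAvals arr nn arr.length = arr := by
  apply List.ext_getElem <;> simp [pvAvals]
  intro i h1 h2
  simp [pvA, Nat.succ_le_of_lt h2, List.getD_eq_getElem?_getD, List.getElem?_eq_getElem h2]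

-- the closed form B exploits: xor terms over a full pair cancel, only the boundary terms remain
theorem pvQ_closed (arr : List Int) (nn k : Nat) (hnL : nn ≤ arr.length)
    (h2 : arr.length ≤ 2 * nn + 1) (hk : nn < k) :
    pvQ arr nn k =
      PySem.Int.bxor
        (PySem.Int.bxor (pvQ arr nn nn)
          (if arr.length % 2 = 1 then pvQ arr nn (arr.length / 2) else 0))
        (if (k - 1 + arr.length - nn) % 2 = 0 then pvQ arr nn ((k - 1 + arr.length - nn) / 2) else 0) := by
  have hk' : nn + 1 ≤ k := hk
  clear hk
  induction k, hk' using Nat.le_induction with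
  | base =>
    rw [pvQ_high arr nn (nn + 1) h2 (by omega)]
    simp only [Nat.add_sub_cancel]
    rw [show nn + arr.length - nn = arr.length by omega]
    by_cases hp : arr.length % 2 = 1
    · rw [if_pos hp, if_neg (by omega)]
      simp [PySem.Int.bxor_zero]
    · rw [if_neg hp, if_pos (by omega)]
      simp [PySem.Int.bxor_zero]
  | succ k hk ih =>
    rw [pvQ_high arr nn (k + 1) h2 (by omega)]
    simp only [Nat.add_sub_cancel]
    rw [ih]
    by_cases hp : (k - 1 + arr.length - nn) % 2 = 0
    · rw [if_pos hp, if_neg (show ¬((k + arr.length - nn) % 2 = 0) by omega),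
        show (k + arr.length - nn) / 2 = (k - 1 + arr.length - nn) / 2 by omega]
      rw [pvBxorAssoc]
      simp [PySem.Int.bxor_self, PySem.Int.bxor_zero]
    · rw [if_neg hp, if_pos (show (k + arr.length - nn) % 2 = 0 by omega)]
      simp [PySem.Int.bxor_zero]

theorem pvPreB_aux (arr : List Int) (nn : Nat) (hnL : nn ≤ arr.length) (l2 : List Int) (j : Nat)
    (hd : (arr.take nn).drop j = l2) (hj : j ≤ nn) :
    l2.foldl (fun pre x => pre ++ [PySem.Int.bxor ((PySem.List.pyGet? pre (-1)).getD 0) x]) (pvQvals arr nn j)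
      = pvQvals arr nn nn := by
  induction l2 generalizing j with
  | nil =>
    have : j = nn := by
      have := congrArg List.length hd; simp at this; omega
    rw [this, List.foldl_nil]
  | cons x xs ih =>
    have hlen : j < nn := by
      have := congrArg List.length hd; simp at this; omega
    have hx : arr.getD j 0 = x := by
      have h0 : ((arr.take nn).drop j)[0]? = some x := by rw [hd]; rfl
      rw [List.getElem?_drop, Nat.add_zero, List.getElem?_take, if_pos hlen,
        List.getElem?_eq_getElem (by omega : j < arr.length)] at h0
      rw [List.getD_eq_getElem?_getD, List.getElem?_eq_getElem (by omega : j < arr.length)]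
      exact Option.some_injective _ h0
    have hxs : (arr.take nn).drop (j + 1) = xs := by
      have := congrArg List.tail hd
      simpa [List.tail_drop] using this
    rw [List.foldl_cons, pvQvals_last, ← hx, ← pvQ_step arr nn j hlen hnL, ← pvQvals_snoc]
    exact ih (j + 1) hxs (by omega)

theorem pvPreB_eq (arr : List Int) :
    pvPreB arr = pvQvals arr arr.length arr.length := by
  have h0 : pvQvals arr arr.length 0 = [0] := by simp [pvQvals, pvQ, pvXor]
  rw [pvPreB, ← h0]
  exact pvPreB_aux arr arr.length le_rfl arr 0 (by simp) (by omega)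

theorem pvBuildPreA_aux (arr : List Int) (nn : Nat) (hnL : nn ≤ arr.length) (d j : Nat)
    (hj : j ≤ nn) (hd : nn - j = d) :
    (PySem.List.pyRange ((j : Int) + 1) ((nn : Int) + 1) 1).foldl
      (fun pre i =>
        PySem.List.pySetD pre i
          (PySem.Int.bxor ((PySem.List.pyGet? pre (i - 1)).getD 0)
            ((PySem.List.pyGet? arr (i - 1)).getD 0)))
      (pvQvals arr nn j ++ List.replicate (nn - j) 0)
      = pvQvals arr nn nn := by
  induction d generalizing j with
  | zero =>
    have hje : j = nn := by omega
    subst hje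
    rw [PySem.List.pyRange_one_eq_nil (by omega)]
    simp
  | succ d ih =>
    have hlt : j < nn := by omega
    rw [PySem.List.pyRange_one_cons (by exact_mod_cast by omega : (j : Int) + 1 < (nn : Int) + 1)]
    rw [List.foldl_cons]
    have hset :
        (PySem.List.pySetD (pvQvals arr nn j ++ List.replicate (nn - j) 0) ((j : Int) + 1)
          (PySem.Int.bxor ((PySem.List.pyGet? (pvQvals arr nn j ++ List.replicate (nn - j) 0) ((j : Int) + 1 - 1)).getD 0)
            ((PySem.List.pyGet? arr ((j : Int) + 1 - 1)).getD 0)))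
        = pvQvals arr nn (j + 1) ++ List.replicate (nn - (j + 1)) 0 := by
      have hidx : ((j : Int) + 1 - 1) = ((j : Nat) : Int) := by ring
      rw [hidx, PySem.List.pyGet?_natCast, PySem.List.pyGet?_natCast]
      rw [List.getElem?_append_left (by rw [pvQvals_length]; omega)]
      have hpj : (pvQvals arr nn j)[j]? = some (pvQ arr nn j) := by
        simp [pvQvals, List.getElem?_eq_getElem, Nat.lt_succ_self j]
      rw [hpj, ← List.getD_eq_getElem?_getD]
      have hcast : ((j : Int) + 1) = (((j + 1 : Nat)) : Int) := by push_cast; ring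
      rw [hcast, PySem.List.pySetD_natCast]
      rw [List.set_append, if_neg (by rw [pvQvals_length]; omega), pvQvals_length]
      have hrep : List.replicate (nn - j) (0 : Int) = 0 :: List.replicate (nn - (j + 1)) 0 := by
        rw [show nn - j = (nn - (j + 1)) + 1 by omega, List.replicate_succ]
      rw [hrep]
      simp only [Nat.sub_self, List.set_cons_zero]
      rw [pvQvals_snoc, pvQ_step arr nn j hlt hnL, List.append_assoc]
      rfl
    rw [hset]
    have hcast2 : ((j : Int) + 1 + 1) = (((j + 1 : Nat)) : Int) + 1 := by push_cast; ring
    rw [hcast2]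
    exact ih (j + 1) (by omega) (by omega)

theorem pvBuildPreA_eq (arr : List Int) (nn : Nat) (hnL : nn ≤ arr.length) :
    pvBuildPreA (nn : Int) arr = pvQvals arr nn nn := by
  have h0 : pvQvals arr nn 0 = [0] := by simp [pvQvals, pvQ, pvXor]
  have hrep : List.replicate ((nn : Int) + 1).toNat (0 : Int)
      = pvQvals arr nn 0 ++ List.replicate (nn - 0) 0 := by
    rw [h0, show ((nn : Int) + 1).toNat = nn + 1 by omega]
    simp [List.replicate_succ]
  rw [pvBuildPreA, hrep, show (1 : Int) = ((0 : Nat) : Int) + 1 by norm_num]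
  exact pvBuildPreA_aux arr nn hnL nn 0 (by omega) (by omega)

theorem pvLoopA_eq (arr : List Int) (nn : Nat) (hnL : nn ≤ arr.length)
    (h2 : arr.length ≤ 2 * nn + 1) (r : Int) (R m : Nat) (hr : r = (R : Int))
    (hN : arr.length ≤ m) (hm : m ≤ R + 1) :
    pvLoopA r (pvAvals arr nn m) (pvQvals arr nn (nn + (m - arr.length))) = pvAvals arr nn (R + 1) := by
  subst hr
  induction hd : (R + 1 - m) generalizing m with
  | zero =>
    have hme : m = R + 1 := by omega
    subst hme
    rw [pvLoopA, if_neg (by rw [pvAvals_length]; exact_mod_cast by omega)]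
  | succ d ih =>
    have hle : m ≤ R := by omega
    rw [pvLoopA, if_pos (by rw [pvAvals_length]; exact_mod_cast hle)]
    simp only [pvAvals_length]
    have hfd : PySem.Int.floordiv ((m : Nat) : Int) 2 = (((m / 2 : Nat)) : Int) := by
      exact_mod_cast PySem.Int.floordiv_natCast m 2
    rw [hfd, pvQvals_get arr nn (nn + (m - arr.length)) (m / 2) (by omega), pvQvals_last]
    have hq : PySem.Int.bxor (pvQ arr nn (nn + (m - arr.length))) (pvQ arr nn (m / 2))
        = pvQ arr nn ((nn + (m - arr.length)) + 1) := by
      rw [pvQ_high arr nn ((nn + (m - arr.length)) + 1) h2 (by omega)]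
      simp only [Nat.add_sub_cancel]
      rw [show nn + (m - arr.length) + arr.length - nn = m by omega]
    rw [hq, ← pvQvals_snoc, show nn + (m - arr.length) + 1 = nn + (m + 1 - arr.length) by omega]
    rw [← pvA_high arr nn m hN, ← pvAvals_snoc]
    exact ih (m + 1) (by omega) (by omega) (by omega)

theorem pvP_eq (arr : List Int) (k : Nat) :
    pvP arr.length (pvQvals arr arr.length arr.length) k = pvQ arr arr.length k := by
  induction k using Nat.strong_induction_on with
  | _ k ih =>
    by_cases hk : k ≤ arr.length
    · rw [pvP, if_pos hk]
      exact pvQvals_get arr arr.length arr.length k hk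
    · rw [pvP, if_neg hk]
      simp only []
      rw [pvQvals_get arr arr.length arr.length arr.length le_rfl]
      have hdec : (k - 1) / 2 < k := by omega
      rw [pvQ_closed arr arr.length k le_rfl (by omega) (by omega),
        show k - 1 + arr.length - arr.length = k - 1 by omega]
      by_cases hp : arr.length % 2 = 1
      · rw [if_pos hp, if_pos hp,
          pvQvals_get arr arr.length arr.length (arr.length / 2) (by omega)]
        by_cases hkp : (k - 1) % 2 = 0
        · rw [if_pos hkp, if_pos hkp, ih _ hdec]
        · rw [if_neg hkp, if_neg hkp, PySem.Int.bxor_zero]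
      · rw [if_neg hp, if_neg hp, PySem.Int.bxor_zero]
        by_cases hkp : (k - 1) % 2 = 0
        · rw [if_pos hkp, if_pos hkp, ih _ hdec]
        · rw [if_neg hkp, if_neg hkp, PySem.Int.bxor_zero]

theorem pvMain (n l r : Int) (arr : List Int)
    (hpre : Pre_codeforces n l r arr) : codeforces n l r arr = codeforces_alt n l r arr := by
  obtain ⟨hr1, hcase⟩ := hpre
  rw [codeforces, codeforces_alt]
  rcases hcase with ⟨hrn, hrL⟩ | ⟨hnr, hrL⟩ | ⟨hn, hLr⟩
  · rw [if_pos hrn, if_pos hrL]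
  · -- n < r < len(arr): A skips its while loop and returns arr[r-1], like B's first branch
    rw [if_neg (by omega), if_pos (by omega), pvLoopA, if_neg (by omega)]
  · by_cases hrn : r ≤ n
    · rw [if_pos hrn, if_pos (by omega)]
    · -- n = len(arr) < r: the computed-term case
      rw [if_neg hrn, if_neg (by omega)]
      have hrR : r = ((r.toNat : Nat) : Int) := by omega
      rw [hn, pvBuildPreA_eq arr arr.length le_rfl]
      have hA := pvLoopA_eq arr arr.length le_rfl (by omega) r r.toNat arr.length hrR le_rfl (by omega)
      rw [Nat.sub_self, Nat.add_zero, pvAvals_eq] at hA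
      rw [hA]
      have hidx : r - 1 = (((r.toNat - 1 : Nat)) : Int) := by omega
      rw [hidx, PySem.List.pyGet?_natCast,
        pvAvals_get arr arr.length (r.toNat + 1) (r.toNat - 1) (by omega), Option.getD_some,
        show r.toNat - 1 + 1 = r.toNat by omega, pvA, if_neg (by omega)]
      rw [pvPreB_eq arr]
      have hfd : PySem.Int.floordiv (((r.toNat - 1 : Nat)) : Int) 2 = (((r.toNat - 1) / 2 : Nat) : Int) := by
        exact_mod_cast PySem.Int.floordiv_natCast (r.toNat - 1) 2
      rw [hfd, Int.toNat_natCast, pvP_eq arr]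

-- ===== VERDICT (by name: the statement is the Claim_ definition above) =====
theorem codeforces_spec : Claim_equal_codeforces := by
  intro n l r arr _ hpre
  unfold Spec_codeforces
  exact pvMain n l r arr hpre
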